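-- pv_equiv track=rewrite | github.com/mldatascientist23/art_primitive_project | shape_gen/str_main.py | parse_color_db
-- ===== SOURCE A (Python) =====
-- def parse_color_db(txt):
--     databases = {}
--     current_db = None
--     for line in txt.splitlines():
--         line = line.strip()
--         if not line:
--             continue
--         if not line[0].isdigit():
--             current_db = line
--             databases[current_db] = []
--         else:
--             tokens = line.split()
--             if len(tokens) < 4:
--                 continue
--             index = tokens[0]
--             rgb_str = tokens[-2]
--             color_name = " ".join(tokens[1:-2])
--             try:
--                 r, g, b = [int(x) for x in rgb_str.split(",")]
--             except Exception:
--                 continue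
--             databases[current_db].append((color_name, (r, g, b)))
--     return databases
-- ===== SOURCE B (Python) =====
-- def _parse_entry(line):
--     tokens = line.split()
--     if len(tokens) < 4:
--         return None
--     parts = tokens[-2].split(",")
--     if len(parts) != 3:
--         return None
--     try:
--         r, g, b = (int(x) for x in parts)
--     except ValueError:
--         return None
--     return (" ".join(tokens[1:-2]), (r, g, b))
--
--
-- def parse_color_db(txt):
--     # pass 1: split the text into named sections of raw entry lines
--     sections = []
--     for raw in txt.splitlines():
--         line = raw.strip()
--         if not line:
--             continue
--         if line[0].isdigit():
--             if sections:
--                 sections[-1][1].append(line)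
--         else:
--             sections.append((line, []))
--     # pass 2: parse each section's entry lines
--     db = {}
--     for name, entries in sections:
--         db[name] = [e for e in map(_parse_entry, entries) if e is not None]
--     return db
-- ===== Notes on version B (the rewrite author's own statement) =====
-- stated objective: alternative
-- what changed: A's single stateful loop (dict + current-key mutation per line) is replaced by a two-pass decomposition: first split the text into named sections of raw entry lines, then parse each section's lines with a small per-line helper and build the dict from the sections.
import Mathlib
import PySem

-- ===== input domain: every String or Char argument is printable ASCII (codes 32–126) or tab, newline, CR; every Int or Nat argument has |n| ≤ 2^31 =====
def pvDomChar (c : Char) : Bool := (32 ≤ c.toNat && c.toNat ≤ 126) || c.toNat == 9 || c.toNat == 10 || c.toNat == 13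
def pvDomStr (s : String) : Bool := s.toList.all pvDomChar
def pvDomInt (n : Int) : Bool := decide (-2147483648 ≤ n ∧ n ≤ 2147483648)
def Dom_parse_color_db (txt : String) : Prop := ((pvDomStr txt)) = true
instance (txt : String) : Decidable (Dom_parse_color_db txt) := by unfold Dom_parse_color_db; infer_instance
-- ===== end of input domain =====

-- B replaces A's single stateful loop by a two-pass decomposition (split the text into named
-- sections of raw entry lines, then parse each section's lines with a small helper); alternative
-- decomposition, same cost, no speed claim.

-- line[0].isdigit() for a non-empty line (shared primitive-level helper)
def pvDigitStart (l : String) : Bool :=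
  match l.toList with
  | [] => false
  | c :: _ => PySem.Chars.isdigit c

-- ===== PORT A =====
def pvA_step (st : PySem.Dict String (List (String × (Int × Int × Int))) × Option String)
    (raw : String) : PySem.Dict String (List (String × (Int × Int × Int))) × Option String :=
  let line := PySem.Str.strip raw
  if PySem.Str.len line == 0 then st                        -- if not line: continue
  else if pvDigitStart line = false then
    (st.1.insert line [], some line)                        -- current_db = line; databases[current_db] = []
  else
    let tokens := PySem.Str.split₀ line                     -- line.split()
    if tokens.length < 4 then st
    else
      -- tokens[0] (index) is computed by A but never used
      let rgb_str := (PySem.List.pyGet? tokens (-2)).getD ""  -- tokens[-2]; length ≥ 4 so pyGet? is some, getD exact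
      let color_name := PySem.Str.join " " (PySem.List.slice tokens (some 1) (some (-2)))
      match ((PySem.Str.split? rgb_str ",").getD []).mapM PySem.Int.ofStr? with
        -- rgb_str.split(","): sep "," ≠ "" so split? is some, getD exact; int(x) = ofStr?
      | some [r, g, b] =>
          match st.2 with
          | some cur => (st.1.modify cur [] (fun es => es ++ [(color_name, (r, g, b))]), st.2)
          | none => st                                      -- Python raises KeyError here; excluded by Pre_
      | _ => st                                             -- ValueError (bad int / not exactly 3 values): continue

def parse_color_db (txt : String) : List (String × List (String × (Int × Int × Int))) :=
  (((PySem.Str.splitlines txt).foldl pvA_step (PySem.Dict.empty, none)).1).items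

-- ===== PORT B =====
def pvB_parseEntry (line : String) : Option (String × (Int × Int × Int)) :=
  let tokens := PySem.Str.split₀ line
  if tokens.length < 4 then none
  else
    let parts := (PySem.Str.split? ((PySem.List.pyGet? tokens (-2)).getD "") ",").getD []
      -- tokens[-2].split(","); both exact as in port A
    if parts.length ≠ 3 then none
    else
      match parts.mapM PySem.Int.ofStr? with
      | some [r, g, b] =>
          some (PySem.Str.join " " (PySem.List.slice tokens (some 1) (some (-2))), (r, g, b))
      | _ => none

-- sections[-1][1].append(line)
def pvB_appendLast : List (String × List String) → String → List (String × List String)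
  | [], _ => []
  | [(n, es)], e => [(n, es ++ [e])]
  | s :: t :: rest, e => s :: pvB_appendLast (t :: rest) e

def pvB_secStep (secs : List (String × List String)) (raw : String) : List (String × List String) :=
  let line := PySem.Str.strip raw
  if PySem.Str.len line == 0 then secs
  else if pvDigitStart line then
    (if secs.isEmpty then secs else pvB_appendLast secs line)
  else secs ++ [(line, [])]

def parse_color_db_alt (txt : String) : List (String × List (String × (Int × Int × Int))) :=
  let secs := (PySem.Str.splitlines txt).foldl pvB_secStep []
  (secs.foldl (fun d p => d.insert p.1 ((p.2.map pvB_parseEntry).filterMap id))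
      (PySem.Dict.empty : PySem.Dict String (List (String × (Int × Int × Int))))).items

-- ===== PRECONDITION & SPEC =====
-- the shape of an entry line that A appends (≥ 4 whitespace tokens and tokens[-2] three comma-separated ints)
def pvEntryOk (l : String) : Bool :=
  let tokens := PySem.Str.split₀ l
  decide (4 ≤ tokens.length) &&
    (match ((PySem.Str.split? ((PySem.List.pyGet? tokens (-2)).getD "") ",").getD []).mapM PySem.Int.ofStr? with
     | some [_, _, _] => true
     | _ => false)

-- the stripped non-empty lines that precede the first section header (all digit-starting)
def pvLeadLines (txt : String) : List String :=
  (((PySem.Str.splitlines txt).map PySem.Str.strip).filter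
      (fun l => !(PySem.Str.len l == 0))).takeWhile pvDigitStart

-- Pre_ excludes exactly the inputs on which Python A raises KeyError: a well-formed entry line
-- (≥ 4 tokens, tokens[-2] three comma-separated ints) occurring before the first section header.
def Pre_parse_color_db (txt : String) : Prop := ((pvLeadLines txt).any pvEntryOk) = false
instance (txt : String) : Decidable (Pre_parse_color_db txt) := by
  unfold Pre_parse_color_db; infer_instance

def pvWitness_parse_color_db : String := "Foo\n0 red 1,2,3 x"

def Spec_parse_color_db (txt : String) (out : List (String × List (String × (Int × Int × Int)))) : Prop :=
  out = parse_color_db_alt txt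
instance (txt : String) (out : List (String × List (String × (Int × Int × Int)))) :
    Decidable (Spec_parse_color_db txt out) := by unfold Spec_parse_color_db; infer_instance

-- ===== CLAIM (what is proved, stated in full; the proofs are below) =====
def Claim_equal_parse_color_db : Prop :=
  ∀ (txt : String), Dom_parse_color_db txt → Pre_parse_color_db txt →
    Spec_parse_color_db txt (parse_color_db txt)

-- ===== LEMMAS AND PROOFS =====

-- B's second pass, parametrised by the starting dict (proof helper)
def pvBuild (d₀ : PySem.Dict String (List (String × (Int × Int × Int))))
    (secs : List (String × List String)) : PySem.Dict String (List (String × (Int × Int × Int))) :=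
  secs.foldl (fun d p => d.insert p.1 ((p.2.map pvB_parseEntry).filterMap id)) d₀

lemma pvBuild_concat (d₀ : PySem.Dict String (List (String × (Int × Int × Int))))
    (init : List (String × List String)) (n : String) (es : List String) :
    pvBuild d₀ (init ++ [(n, es)]) =
      (pvBuild d₀ init).insert n ((es.map pvB_parseEntry).filterMap id) := by
  simp [pvBuild, List.foldl_append]

lemma pv_appendLast_concat (init : List (String × List String)) (n : String)
    (es : List String) (e : String) :
    pvB_appendLast (init ++ [(n, es)]) e = init ++ [(n, es ++ [e])] := by
  induction init with
  | nil => rfl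
  | cons s t ih =>
    cases t with
    | nil => cases s; rfl
    | cons u v => simpa [pvB_appendLast] using ih

lemma pv_parsed_concat (es : List String) (e : String) :
    (((es ++ [e]).map pvB_parseEntry).filterMap id) =
      ((es.map pvB_parseEntry).filterMap id) ++ (pvB_parseEntry e).toList := by
  cases hpe : pvB_parseEntry e <;> simp [List.filterMap_append, hpe]

lemma pv_modify_insert (d : PySem.Dict String (List (String × (Int × Int × Int))))
    (k : String) (v : List (String × (Int × Int × Int))) (f : _ → _) :
    (d.insert k v).modify k [] f = d.insert k (f v) := by
  simp [PySem.Dict.modify, PySem.Dict.getD_insert_self, PySem.Dict.insert_insert_self]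

lemma pv_stepA_blank (st : PySem.Dict String (List (String × (Int × Int × Int))) × Option String)
    (raw : String) (h : (PySem.Str.len (PySem.Str.strip raw) == 0) = true) :
    pvA_step st raw = st := by
  simp only [pvA_step]
  simp at h
  simp [h]

lemma pv_stepB_blank (secs : List (String × List String)) (raw : String)
    (h : (PySem.Str.len (PySem.Str.strip raw) == 0) = true) :
    pvB_secStep secs raw = secs := by
  simp only [pvB_secStep]
  simp at h
  simp [h]

lemma pv_stepA_header (st : PySem.Dict String (List (String × (Int × Int × Int))) × Option String)
    (raw : String) (h0 : (PySem.Str.len (PySem.Str.strip raw) == 0) = false)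
    (h1 : pvDigitStart (PySem.Str.strip raw) = false) :
    pvA_step st raw = (st.1.insert (PySem.Str.strip raw) [], some (PySem.Str.strip raw)) := by
  simp only [pvA_step]
  simp at h0
  simp [h0, h1]

lemma pv_stepB_header (secs : List (String × List String)) (raw : String)
    (h0 : (PySem.Str.len (PySem.Str.strip raw) == 0) = false)
    (h1 : pvDigitStart (PySem.Str.strip raw) = false) :
    pvB_secStep secs raw = secs ++ [(PySem.Str.strip raw, [])] := by
  simp only [pvB_secStep]
  simp at h0
  simp [h0, h1]

lemma pv_stepB_entry (secs : List (String × List String)) (raw : String)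
    (h0 : (PySem.Str.len (PySem.Str.strip raw) == 0) = false)
    (h1 : pvDigitStart (PySem.Str.strip raw) = true) :
    pvB_secStep secs raw =
      (if secs.isEmpty then secs else pvB_appendLast secs (PySem.Str.strip raw)) := by
  simp only [pvB_secStep]
  simp at h0
  simp [h0, h1]

lemma pv_mapM_length {α β : Type} (f : α → Option β) :
    ∀ (xs : List α) (ys : List β), xs.mapM f = some ys → ys.length = xs.length := by
  intro xs
  induction xs with
  | nil => intro ys h; simp_all
  | cons a t ih =>
    intro ys h
    rw [List.mapM_cons] at h
    cases ha : f a <;> rw [ha] at h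
    · simp at h
    · cases ht : t.mapM f <;> rw [ht] at h
      · simp at h
      · simp at h
        subst h
        simp [ih _ ht]

lemma pv_stepA_entry (d : PySem.Dict String (List (String × (Int × Int × Int))))
    (cur : String) (raw : String)
    (h0 : (PySem.Str.len (PySem.Str.strip raw) == 0) = false)
    (h1 : pvDigitStart (PySem.Str.strip raw) = true) :
    pvA_step (d, some cur) raw =
      ((match pvB_parseEntry (PySem.Str.strip raw) with
        | some v => d.modify cur [] (fun es => es ++ [v])
        | none => d), some cur) := by
  generalize hl : PySem.Str.strip raw = l at h0 h1
  unfold pvA_step pvB_parseEntry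
  simp only [hl]
  rw [if_neg (by simpa using h0)]
  rw [if_neg (fun hc => by rw [h1] at hc; cases hc)]
  by_cases hlt : (PySem.Str.split₀ l).length < 4
  · rw [if_pos hlt, if_pos hlt]
  · rw [if_neg hlt, if_neg hlt]
    cases hm : ((PySem.Str.split? ((PySem.List.pyGet? (PySem.Str.split₀ l) (-2)).getD "") ",").getD []).mapM PySem.Int.ofStr? with
    | none => split_ifs <;> rfl
    | some ys =>
      have hlen := pv_mapM_length _ _ _ hm
      match ys, hlen with
      | [r, g, b], hlen => rw [if_neg (by simp at hlen; omega)]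
      | [], hlen => rw [if_pos (by simp at hlen; omega)]
      | [r], hlen => rw [if_pos (by simp at hlen; omega)]
      | [r, g], hlen => rw [if_pos (by simp at hlen; omega)]
      | r :: g :: b :: x :: rest, hlen => rw [if_pos (by simp at hlen; omega)]

lemma pv_stepA_entry_none (d : PySem.Dict String (List (String × (Int × Int × Int))))
    (raw : String)
    (h0 : (PySem.Str.len (PySem.Str.strip raw) == 0) = false)
    (h1 : pvDigitStart (PySem.Str.strip raw) = true) :
    pvA_step (d, none) raw = (d, none) := by
  generalize hl : PySem.Str.strip raw = l at h0 h1
  unfold pvA_step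
  simp only [hl]
  rw [if_neg (by simpa using h0), if_neg (fun hc => by rw [h1] at hc; cases hc)]
  by_cases hlt : (PySem.Str.split₀ l).length < 4
  · rw [if_pos hlt]
  · rw [if_neg hlt]
    split <;> rfl

lemma pv_inv : ∀ (lines : List String) (init : List (String × List String)) (n : String)
    (es : List String) (d₀ : PySem.Dict String (List (String × (Int × Int × Int)))),
    ∃ init' n' es',
      lines.foldl pvB_secStep (init ++ [(n, es)]) = init' ++ [(n', es')] ∧
      lines.foldl pvA_step (pvBuild d₀ (init ++ [(n, es)]), some n) =
        (pvBuild d₀ (init' ++ [(n', es')]), some n') := by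
  intro lines
  induction lines with
  | nil => intro init n es d₀; exact ⟨init, n, es, rfl, rfl⟩
  | cons raw rest ih =>
    intro init n es d₀
    simp only [List.foldl_cons]
    by_cases hb : (PySem.Str.len (PySem.Str.strip raw) == 0) = true
    · rw [pv_stepA_blank _ _ hb, pv_stepB_blank _ _ hb]
      exact ih init n es d₀
    · have h0 : (PySem.Str.len (PySem.Str.strip raw) == 0) = false := by
        cases h : (PySem.Str.len (PySem.Str.strip raw) == 0) <;> simp_all
      by_cases hd : pvDigitStart (PySem.Str.strip raw) = true
      · -- entry line: appended to the last section
        rw [pv_stepB_entry _ _ h0 hd, pv_stepA_entry _ _ _ h0 hd]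
        rw [if_neg (by simp)]
        rw [pv_appendLast_concat]
        have hdict :
            (match pvB_parseEntry (PySem.Str.strip raw) with
              | some v => (pvBuild d₀ (init ++ [(n, es)])).modify n [] (fun es => es ++ [v])
              | none => pvBuild d₀ (init ++ [(n, es)])) =
            pvBuild d₀ (init ++ [(n, es ++ [PySem.Str.strip raw])]) := by
          rw [pvBuild_concat, pvBuild_concat, pv_parsed_concat]
          cases hp : pvB_parseEntry (PySem.Str.strip raw) with
          | none => simp
          | some v => simp [pv_modify_insert]
        rw [hdict]
        exact ih (init) n (es ++ [PySem.Str.strip raw]) d₀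
      · -- header line: a new section is opened
        have hd' : pvDigitStart (PySem.Str.strip raw) = false := by
          cases h : pvDigitStart (PySem.Str.strip raw) <;> simp_all
        rw [pv_stepB_header _ _ h0 hd', pv_stepA_header _ _ h0 hd']
        have hdict : (pvBuild d₀ (init ++ [(n, es)])).insert (PySem.Str.strip raw) [] =
            pvBuild d₀ ((init ++ [(n, es)]) ++ [(PySem.Str.strip raw, [])]) := by
          rw [pvBuild_concat d₀ (init ++ [(n, es)])]
          rfl
        rw [hdict]
        simpa using ih (init ++ [(n, es)]) (PySem.Str.strip raw) [] d₀

lemma pv_start : ∀ (lines : List String),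
    ((lines.foldl pvA_step ((PySem.Dict.empty : PySem.Dict String (List (String × (Int × Int × Int)))), none)).1) =
      pvBuild PySem.Dict.empty (lines.foldl pvB_secStep []) := by
  intro lines
  induction lines with
  | nil => rfl
  | cons raw rest ih =>
    simp only [List.foldl_cons]
    by_cases hb : (PySem.Str.len (PySem.Str.strip raw) == 0) = true
    · rw [pv_stepA_blank _ _ hb, pv_stepB_blank _ _ hb]; exact ih
    · have h0 : (PySem.Str.len (PySem.Str.strip raw) == 0) = false := by
        cases h : (PySem.Str.len (PySem.Str.strip raw) == 0) <;> simp_all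
      by_cases hd : pvDigitStart (PySem.Str.strip raw) = true
      · rw [pv_stepB_entry _ _ h0 hd, pv_stepA_entry_none _ _ h0 hd]
        have hnil : (if ([] : List (String × List String)).isEmpty = true then ([] : List (String × List String))
            else pvB_appendLast [] (PySem.Str.strip raw)) = [] := rfl
        rw [hnil]
        exact ih
      · have hd' : pvDigitStart (PySem.Str.strip raw) = false := by
          cases h : pvDigitStart (PySem.Str.strip raw) <;> simp_all
        rw [pv_stepB_header _ _ h0 hd', pv_stepA_header _ _ h0 hd']
        have hone : (PySem.Dict.empty : PySem.Dict String (List (String × (Int × Int × Int)))).insert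
            (PySem.Str.strip raw) [] = pvBuild PySem.Dict.empty [(PySem.Str.strip raw, [])] := rfl
        obtain ⟨init', n', es', hB, hA⟩ :=
          pv_inv rest [] (PySem.Str.strip raw) [] PySem.Dict.empty
        simp only [List.nil_append] at hB hA
        rw [hone, hA]
        simp only [List.nil_append, hB]

-- ===== VERDICT (by name: the statement is the Claim_ definition above) =====
theorem parse_color_db_spec : Claim_equal_parse_color_db := by
  intro txt _ _
  unfold Spec_parse_color_db parse_color_db parse_color_db_alt
  have h := pv_start (PySem.Str.splitlines txt)
  rw [h]
  rfl
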